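-- pv_equiv track=rewrite | github.com/meshal-1202/AI-classification | scripts/archive/build_500_sweep_from_benchmark.py | count_same_conv_macs
-- ===== SOURCE A (Python) =====
-- def count_same_conv_macs(ch_in: int, h: int, w: int, ch_out: int) -> int:
--     taps = 0
--     for oh in range(h):
--         for ow in range(w):
--             for ky in range(3):
--                 in_y = oh + ky - 1
--                 if in_y < 0 or in_y >= h:
--                     continue
--                 for kx in range(3):
--                     in_x = ow + kx - 1
--                     if in_x < 0 or in_x >= w:
--                         continue
--                     taps += 1
--     return taps * ch_in * ch_out
-- ===== SOURCE B (Python) =====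
-- def count_same_conv_macs(ch_in: int, h: int, w: int, ch_out: int) -> int:
--     # Closed form: each dimension of size n >= 1 contributes 3n - 2 valid
--     # kernel offsets summed over all output positions; empty if n < 1.
--     if h < 1 or w < 1:
--         return 0
--     return (3 * h - 2) * (3 * w - 2) * ch_in * ch_out
-- ===== Notes on version B (the rewrite author's own statement) =====
-- stated objective: faster
-- what changed: Replaced the quadruple nested loop over output pixels and kernel offsets by the closed form (3h-2)(3w-2)*ch_in*ch_out (0 when h<1 or w<1).
import Mathlib
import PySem

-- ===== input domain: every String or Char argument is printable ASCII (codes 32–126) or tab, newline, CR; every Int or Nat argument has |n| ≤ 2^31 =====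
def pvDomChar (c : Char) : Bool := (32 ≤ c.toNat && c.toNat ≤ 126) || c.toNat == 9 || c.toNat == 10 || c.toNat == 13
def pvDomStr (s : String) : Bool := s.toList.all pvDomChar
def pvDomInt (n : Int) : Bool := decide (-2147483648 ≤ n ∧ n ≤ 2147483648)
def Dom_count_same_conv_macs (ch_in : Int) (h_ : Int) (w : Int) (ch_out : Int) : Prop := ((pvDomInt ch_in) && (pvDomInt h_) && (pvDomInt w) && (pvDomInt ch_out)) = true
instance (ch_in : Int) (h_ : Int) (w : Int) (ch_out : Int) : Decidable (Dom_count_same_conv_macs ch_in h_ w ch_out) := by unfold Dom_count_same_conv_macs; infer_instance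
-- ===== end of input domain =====

set_option maxHeartbeats 1000000


-- B replaces A's nested loops over output pixels and kernel offsets by the
-- closed form (3h-2)(3w-2)*ch_in*ch_out (0 when h<1 or w<1): asymptotically faster.

-- ===== PORT A =====
def count_same_conv_macs (ch_in : Int) (h_ : Int) (w : Int) (ch_out : Int) : Int :=
  let taps : Int :=
    (PySem.List.pyRange 0 h_ 1).foldl (fun taps oh =>
      (PySem.List.pyRange 0 w 1).foldl (fun taps ow =>
        (PySem.List.pyRange 0 3 1).foldl (fun taps ky =>
          let in_y := oh + ky - 1
          if in_y < 0 ∨ in_y ≥ h_ then taps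
          else
            (PySem.List.pyRange 0 3 1).foldl (fun taps kx =>
              let in_x := ow + kx - 1
              if in_x < 0 ∨ in_x ≥ w then taps
              else taps + 1) taps) taps) taps) 0
  taps * ch_in * ch_out

-- ===== PORT B =====
def count_same_conv_macs_alt (ch_in : Int) (h_ : Int) (w : Int) (ch_out : Int) : Int :=
  if h_ < 1 ∨ w < 1 then 0
  else (3 * h_ - 2) * (3 * w - 2) * ch_in * ch_out

-- ===== PRECONDITION & SPEC =====
def Spec_count_same_conv_macs (ch_in : Int) (h_ : Int) (w : Int) (ch_out : Int) (out : Int) : Prop := out = count_same_conv_macs_alt ch_in h_ w ch_out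
instance (ch_in : Int) (h_ : Int) (w : Int) (ch_out : Int) (out : Int) : Decidable (Spec_count_same_conv_macs ch_in h_ w ch_out out) := by unfold Spec_count_same_conv_macs; infer_instance

-- ===== CLAIM (what is proved, stated in full; the proofs are below) =====
def Claim_equal_count_same_conv_macs : Prop := ∀ (ch_in : Int) (h_ : Int) (w : Int) (ch_out : Int), Dom_count_same_conv_macs ch_in h_ w ch_out → Spec_count_same_conv_macs ch_in h_ w ch_out (count_same_conv_macs ch_in h_ w ch_out)

-- ===== LEMMAS AND PROOFS =====

-- number of kernel offsets k ∈ {0,1,2} with 0 ≤ i + k - 1 < n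
def pvCnt (i n : Int) : Int :=
  (if 0 ≤ i - 1 ∧ i - 1 < n then 1 else 0) +
  (if 0 ≤ i ∧ i < n then 1 else 0) +
  (if 0 ≤ i + 1 ∧ i + 1 < n then 1 else 0)

theorem pv_kx_loop (w ow t : Int) :
    (PySem.List.pyRange 0 3 1).foldl (fun taps kx =>
      let in_x := ow + kx - 1
      if in_x < 0 ∨ in_x ≥ w then taps else taps + 1) t = t + pvCnt ow w := by
  have h3 : PySem.List.pyRange 0 3 1 = [0, 1, 2] := by decide
  simp only [h3, List.foldl, pvCnt]
  split_ifs <;> omega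

theorem pv_ky_loop (h_ w oh ow t : Int) :
    (PySem.List.pyRange 0 3 1).foldl (fun taps ky =>
      let in_y := oh + ky - 1
      if in_y < 0 ∨ in_y ≥ h_ then taps
      else
        (PySem.List.pyRange 0 3 1).foldl (fun taps kx =>
          let in_x := ow + kx - 1
          if in_x < 0 ∨ in_x ≥ w then taps
          else taps + 1) taps) t = t + pvCnt oh h_ * pvCnt ow w := by
  have h3 : PySem.List.pyRange 0 3 1 = [0, 1, 2] := by decide
  simp only [pv_kx_loop]
  rw [h3]
  simp only [List.foldl]
  generalize pvCnt ow w = c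
  simp only [pvCnt]
  split_ifs <;> omega

theorem pv_ow_loop (h_ w oh t : Int) :
    (PySem.List.pyRange 0 w 1).foldl (fun taps ow =>
      (PySem.List.pyRange 0 3 1).foldl (fun taps ky =>
        let in_y := oh + ky - 1
        if in_y < 0 ∨ in_y ≥ h_ then taps
        else
          (PySem.List.pyRange 0 3 1).foldl (fun taps kx =>
            let in_x := ow + kx - 1
            if in_x < 0 ∨ in_x ≥ w then taps
            else taps + 1) taps) taps) t
    = t + pvCnt oh h_ * ((PySem.List.pyRange 0 w 1).map (fun i => pvCnt i w)).sum := by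
  simp only [pv_ky_loop]
  rw [PySem.List.foldl_add (g := fun ow => pvCnt oh h_ * pvCnt ow w)]
  rw [List.sum_map_mul_left]

-- the per-dimension sum: for n ≥ 1, Σ_{i ∈ [0,n)} pvCnt i n = 3n - 2
theorem pv_sum_cnt (n : Int) (hn : 1 ≤ n) :
    ((PySem.List.pyRange 0 n 1).map (fun i => pvCnt i n)).sum = 3 * n - 2 := by
  induction n, hn using Int.le_induction with
  | base => decide
  | succ m hm ih =>
    rw [PySem.List.pyRange_one_succ_right (by omega)]
    rw [PySem.List.pyRange_one_append 0 (m - 1) m (by omega) (by omega)]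
    have hsing : PySem.List.pyRange (m - 1) m 1 = [m - 1] := by
      rw [PySem.List.pyRange_one_cons (by omega), PySem.List.pyRange_one_eq_nil (by omega)]
    rw [hsing]
    have hcongr : (PySem.List.pyRange 0 (m - 1) 1).map (fun i => pvCnt i (m + 1))
        = (PySem.List.pyRange 0 (m - 1) 1).map (fun i => pvCnt i m) := by
      apply List.map_congr_left
      intro i hi
      rw [PySem.List.mem_pyRange_one] at hi
      simp only [pvCnt]
      split_ifs <;> omega
    have hold := ih
    rw [PySem.List.pyRange_one_append 0 (m - 1) m (by omega) (by omega)] at hold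
    rw [hsing] at hold
    simp only [List.map_append, List.sum_append, List.map_cons, List.map_nil,
      List.sum_cons, List.sum_nil, hcongr] at hold ⊢
    have e1 : pvCnt (m - 1) (m + 1) = pvCnt (m - 1) m + 1 := by
      simp only [pvCnt]; split_ifs <;> omega
    have e2 : pvCnt m (m + 1) = 2 := by
      simp only [pvCnt]; split_ifs <;> omega
    rw [e1, e2]
    omega

theorem pv_taps (h_ w : Int) :
    (PySem.List.pyRange 0 h_ 1).foldl (fun taps oh =>
      (PySem.List.pyRange 0 w 1).foldl (fun taps ow =>
        (PySem.List.pyRange 0 3 1).foldl (fun taps ky =>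
          let in_y := oh + ky - 1
          if in_y < 0 ∨ in_y ≥ h_ then taps
          else
            (PySem.List.pyRange 0 3 1).foldl (fun taps kx =>
              let in_x := ow + kx - 1
              if in_x < 0 ∨ in_x ≥ w then taps
              else taps + 1) taps) taps) taps) 0
    = (if h_ < 1 ∨ w < 1 then 0 else (3 * h_ - 2) * (3 * w - 2)) := by
  simp only [pv_ow_loop]
  rw [PySem.List.foldl_add
    (g := fun oh => pvCnt oh h_ * ((PySem.List.pyRange 0 w 1).map (fun i => pvCnt i w)).sum)]
  by_cases hh : h_ < 1
  · rw [PySem.List.pyRange_one_eq_nil (a := (0:Int)) (b := h_) (by omega)]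
    simp [hh]
  · by_cases hw : w < 1
    · rw [PySem.List.pyRange_one_eq_nil (a := (0:Int)) (b := w) (by omega)]
      simp only [List.map_nil, List.sum_nil, mul_zero]
      simp [hh, hw]
    · rw [pv_sum_cnt w (by omega)]
      rw [List.sum_map_mul_right, pv_sum_cnt h_ (by omega)]
      simp [hh, hw]

-- ===== VERDICT (by name: the statement is the Claim_ definition above) =====
theorem count_same_conv_macs_spec : Claim_equal_count_same_conv_macs := by
  intro ch_in h_ w ch_out _
  unfold Spec_count_same_conv_macs count_same_conv_macs count_same_conv_macs_alt
  rw [pv_taps]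
  split_ifs <;> ring
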